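-- pv_equiv track=rewrite | github.com/ventvinyl/weak_espresso | interpolation/interpolation.py | rational_reconstruct
-- ===== SOURCE A (Python) =====
-- from typing import List, Tuple, Optional, Dict
-- from math import gcd, isqrt
--
-- def rational_reconstruct(A: int, M: int) -> Optional[Tuple[int, int]]:
--     """
--     https://coursys.sfu.ca/2018sp-cmpt-384-d1/pages/Wang
--     """
--     if M == 0:
--         return None
--     if A % M == 0:
--         return (0, 1)
--     halfM = M // 2
--     r0 = M
--     r1 = A % M
--     if r1 < 0:
--         r1 += M
--     s0 = 0
--     s1 = 1
--     while True:
--         rr = r1 * r1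
--         if rr <= halfM:
--             break
--         if r1 == 0:
--             break
--         q = r0 // r1
--         r2 = r0 - q * r1
--         s2 = s0 - q * s1
--         r0 = r1; r1 = r2; s0 = s1; s1 = s2
--     if r1 == 0:
--         return None
--     p = r1
--     q = s1
--     if q < 0:
--         p = -p; q = -q
--     if q == 0:
--         return None
--     bound = isqrt(halfM)
--     if q > bound:
--         return None
--     if p < -bound or p > bound:
--         return None
--     lhs = (A * q - p) % M
--     if lhs < 0:
--         lhs += M
--     if lhs != 0:
--         return None
--     g = gcd(abs(p), abs(q))
--     if g != 0:
--         p //= g; q //= g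
--     return (p, q)
-- ===== SOURCE B (Python) =====
-- from math import gcd, isqrt
--
-- def rational_reconstruct(A, M):
--     if M == 0:
--         return None
--     a = A % M
--     if a == 0:
--         return (0, 1)
--     halfM = M // 2
--     if a < 0:
--         a += M
--     # phase 1: plain remainder loop, recording the quotient list
--     qs = []
--     r0, r1 = M, a
--     while r1 * r1 > halfM and r1 != 0:
--         q = r0 // r1
--         qs.append(q)
--         r0, r1 = r1, r0 - q * r1
--     if r1 == 0:
--         return None
--     # phase 2: rebuild the Bezout coefficient from the quotient list
--     s0, s1 = 0, 1
--     for q in qs: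
--         s0, s1 = s1, s0 - q * s1
--     p, den = (r1, s1) if s1 >= 0 else (-r1, -s1)
--     if den == 0:
--         return None
--     bound = isqrt(halfM)
--     if den > bound or p < -bound or p > bound:
--         return None
--     if (A * den - p) % M != 0:
--         return None
--     g = gcd(p, den)
--     return (p // g, den // g)
-- ===== Notes on version B (the rewrite author's own statement) =====
-- stated objective: alternative
-- what changed: B splits A's fused extended-Euclid while-loop into two passes: a remainder-only loop that records the quotient list, then a fold over that list to rebuild the Bezout coefficient; the validation tail is collapsed into combined conditions and the redundant g!=0 guard is dropped (den>0 guarantees gcd>0).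
import Mathlib
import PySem

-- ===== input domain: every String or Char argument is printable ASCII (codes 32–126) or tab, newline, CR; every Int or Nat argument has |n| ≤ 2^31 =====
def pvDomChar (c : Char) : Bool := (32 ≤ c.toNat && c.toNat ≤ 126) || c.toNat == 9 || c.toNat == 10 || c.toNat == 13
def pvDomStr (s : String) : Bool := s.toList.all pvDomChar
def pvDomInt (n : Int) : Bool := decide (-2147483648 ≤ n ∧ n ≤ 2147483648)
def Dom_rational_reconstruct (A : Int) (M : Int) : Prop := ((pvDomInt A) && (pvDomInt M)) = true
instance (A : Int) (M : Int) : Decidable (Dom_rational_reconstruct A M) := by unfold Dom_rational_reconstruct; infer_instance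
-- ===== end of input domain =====

-- B splits A's fused extended-Euclid loop into a remainder-only loop collecting the
-- quotient list plus a fold rebuilding the Bezout coefficient, and collapses the
-- validation tail (objective: alternative decomposition; return value only, no mutation).

-- Euclid step decreases |r0 - (r0//r1)*r1| below |r1| (used by both loops' termination)
theorem pvEuclid_step_lt (r0 r1 : Int) (h : r1 ≠ 0) :
    (r0 - PySem.Int.floordiv r0 r1 * r1).natAbs < r1.natAbs := by
  have hd := PySem.Int.floordiv_mul_add_mod r0 r1
  rcases lt_trichotomy r1 0 with hb|hb|hb
  · have h1 := PySem.Int.mod_neg_bounds r0 hb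
    have he : r0 - PySem.Int.floordiv r0 r1 * r1 = PySem.Int.mod r0 r1 := by omega
    rw [he]; omega
  · omega
  · have h1 := PySem.Int.mod_nonneg r0 hb
    have h2 := PySem.Int.mod_lt r0 hb
    have he : r0 - PySem.Int.floordiv r0 r1 * r1 = PySem.Int.mod r0 r1 := by omega
    rw [he]; omega

-- ===== PORT A =====
-- A's `while True` loop over (r0, r1, s0, s1) with its two break tests in order
def pvLoopA (halfM r0 r1 s0 s1 : Int) : Int × Int :=
  if r1 * r1 ≤ halfM then (r1, s1)
  else if r1 = 0 then (r1, s1)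
  else
    let q := PySem.Int.floordiv r0 r1
    pvLoopA halfM r1 (r0 - q * r1) s1 (s0 - q * s1)
termination_by r1.natAbs
decreasing_by exact pvEuclid_step_lt r0 r1 (by assumption)

def rational_reconstruct (A : Int) (M : Int) : Option (Int × Int) :=
  if M = 0 then none
  else if PySem.Int.mod A M = 0 then some (0, 1)
  else
    let halfM := PySem.Int.floordiv M 2
    let r1i := PySem.Int.mod A M
    let r1' := if r1i < 0 then r1i + M else r1i
    let rs := pvLoopA halfM M r1' 0 1
    if rs.1 = 0 then none
    else
      let p := rs.1
      let q := rs.2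
      let pq := if q < 0 then (-p, -q) else (p, q)
      if pq.2 = 0 then none
      else
        -- isqrt(halfM): ported as Nat.sqrt of toNat; exact since Python only reaches
        -- this line with halfM ≥ 0 (for M < 0 the loop always ends with r1 = 0)
        let bound : Int := (Nat.sqrt halfM.toNat : Int)
        if pq.2 > bound then none
        else if pq.1 < -bound ∨ pq.1 > bound then none
        else
          let lhs := PySem.Int.mod (A * pq.2 - pq.1) M
          let lhs' := if lhs < 0 then lhs + M else lhs
          if lhs' ≠ 0 then none
          else
            -- math.gcd(abs p, abs q) = Int.gcd (exact)
            let g : Int := (Int.gcd pq.1 pq.2 : Int)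
            if g ≠ 0 then some (PySem.Int.floordiv pq.1 g, PySem.Int.floordiv pq.2 g)
            else some (pq.1, pq.2)

-- ===== PORT B =====
-- phase 1: remainder-only loop collecting the quotient list
def pvLoopB (halfM r0 r1 : Int) (qs : List Int) : List Int × Int :=
  if r1 * r1 > halfM ∧ r1 ≠ 0 then
    let q := PySem.Int.floordiv r0 r1
    pvLoopB halfM r1 (r0 - q * r1) (qs ++ [q])
  else (qs, r1)
termination_by r1.natAbs
decreasing_by exact pvEuclid_step_lt r0 r1 (by exact (by assumption : r1 * r1 > halfM ∧ r1 ≠ 0).2)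

-- phase 2: rebuild the Bezout coefficient by folding the quotient list
def pvRebuild (qs : List Int) : Int × Int :=
  qs.foldl (fun s q => (s.2, s.1 - q * s.2)) (0, 1)

def rational_reconstruct_alt (A : Int) (M : Int) : Option (Int × Int) :=
  if M = 0 then none
  else
    let a := PySem.Int.mod A M
    if a = 0 then some (0, 1)
    else
      let halfM := PySem.Int.floordiv M 2
      let a' := if a < 0 then a + M else a
      let qr := pvLoopB halfM M a' []
      let r1 := qr.2
      if r1 = 0 then none
      else
        let s1 := (pvRebuild qr.1).2
        let pd := if s1 ≥ 0 then (r1, s1) else (-r1, -s1)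
        if pd.2 = 0 then none
        else
          -- isqrt(halfM): Nat.sqrt of toNat; Python only reaches this with halfM ≥ 0
          let bound : Int := (Nat.sqrt halfM.toNat : Int)
          if pd.2 > bound ∨ pd.1 < -bound ∨ pd.1 > bound then none
          else if PySem.Int.mod (A * pd.2 - pd.1) M ≠ 0 then none
          else
            let g : Int := (Int.gcd pd.1 pd.2 : Int)
            some (PySem.Int.floordiv pd.1 g, PySem.Int.floordiv pd.2 g)

-- ===== PRECONDITION & SPEC =====
def Spec_rational_reconstruct (A : Int) (M : Int) (out : Option (Int × Int)) : Prop := out = rational_reconstruct_alt A M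
instance (A : Int) (M : Int) (out : Option (Int × Int)) : Decidable (Spec_rational_reconstruct A M out) := by unfold Spec_rational_reconstruct; infer_instance

-- ===== CLAIM (what is proved, stated in full; the proofs are below) =====
def Claim_equal_rational_reconstruct : Prop := ∀ (A : Int) (M : Int), Dom_rational_reconstruct A M → Spec_rational_reconstruct A M (rational_reconstruct A M)

-- ===== LEMMAS AND PROOFS =====

-- one-step unfolding lemmas for the two loops
theorem pvLoopB_stop (halfM r0 r1 : Int) (qs : List Int) (h : ¬(r1 * r1 > halfM ∧ r1 ≠ 0)) :
    pvLoopB halfM r0 r1 qs = (qs, r1) := by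
  rw [pvLoopB]; exact if_neg h

theorem pvLoopB_go (halfM r0 r1 : Int) (qs : List Int) (h : r1 * r1 > halfM ∧ r1 ≠ 0) :
    pvLoopB halfM r0 r1 qs =
      pvLoopB halfM r1 (r0 - PySem.Int.floordiv r0 r1 * r1) (qs ++ [PySem.Int.floordiv r0 r1]) := by
  rw [pvLoopB, if_pos h]

-- B's accumulator is prefix-independent
theorem pvLoopB_acc (halfM r0 r1 : Int) (qs : List Int) :
    pvLoopB halfM r0 r1 qs = (qs ++ (pvLoopB halfM r0 r1 []).1, (pvLoopB halfM r0 r1 []).2) := by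
  generalize hn : r1.natAbs = n
  induction n using Nat.strong_induction_on generalizing r0 r1 qs with
  | _ n ih =>
    subst hn
    by_cases h : r1 * r1 > halfM ∧ r1 ≠ 0
    · rw [pvLoopB_go halfM r0 r1 qs h, pvLoopB_go halfM r0 r1 [] h]
      have hlt := pvEuclid_step_lt r0 r1 h.2
      rw [ih _ hlt r1 _ _ rfl,
          ih _ hlt r1 (r0 - PySem.Int.floordiv r0 r1 * r1) ([] ++ [PySem.Int.floordiv r0 r1]) rfl]
      simp
    · rw [pvLoopB_stop halfM r0 r1 qs h, pvLoopB_stop halfM r0 r1 [] h]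
      simp

-- the loops agree: A's fused loop = B's quotient loop + fold
theorem pvLoop_agree (halfM r0 r1 s0 s1 : Int) :
    pvLoopA halfM r0 r1 s0 s1 =
      ((pvLoopB halfM r0 r1 []).2,
       ((pvLoopB halfM r0 r1 []).1.foldl (fun s q => (s.2, s.1 - q * s.2)) (s0, s1)).2) := by
  generalize hn : r1.natAbs = n
  induction n using Nat.strong_induction_on generalizing r0 r1 s0 s1 with
  | _ n ih =>
    subst hn
    by_cases h : r1 * r1 > halfM ∧ r1 ≠ 0
    · rw [pvLoopA, if_neg (by omega : ¬ r1 * r1 ≤ halfM), if_neg h.2]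
      rw [pvLoopB_go halfM r0 r1 [] h, pvLoopB_acc]
      have hlt := pvEuclid_step_lt r0 r1 h.2
      show pvLoopA halfM r1 (r0 - PySem.Int.floordiv r0 r1 * r1) s1
          (s0 - PySem.Int.floordiv r0 r1 * s1) = _
      rw [ih _ hlt r1 _ s1 _ rfl]
      simp
    · rw [pvLoopB_stop halfM r0 r1 [] h, pvLoopA]
      rcases not_and_or.mp h with h1 | h1
      · rw [if_pos (by omega : r1 * r1 ≤ halfM)]; simp
      · simp only [not_not] at h1
        by_cases h2 : r1 * r1 ≤ halfM
        · rw [if_pos h2]; simp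
        · rw [if_neg h2, if_pos h1]; simp

-- the exit value of A's loop satisfies the disjunction of its break conditions
theorem pvLoopA_exit (halfM r0 r1 s0 s1 : Int) :
    (pvLoopA halfM r0 r1 s0 s1).1 * (pvLoopA halfM r0 r1 s0 s1).1 ≤ halfM ∨
      (pvLoopA halfM r0 r1 s0 s1).1 = 0 := by
  generalize hn : r1.natAbs = n
  induction n using Nat.strong_induction_on generalizing r0 r1 s0 s1 with
  | _ n ih =>
    subst hn
    by_cases h1 : r1 * r1 ≤ halfM
    · rw [pvLoopA, if_pos h1]; exact Or.inl h1
    · by_cases h2 : r1 = 0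
      · rw [pvLoopA, if_neg h1, if_pos h2]; exact Or.inr h2
      · rw [pvLoopA, if_neg h1, if_neg h2]
        show (pvLoopA halfM r1 (r0 - PySem.Int.floordiv r0 r1 * r1) s1
            (s0 - PySem.Int.floordiv r0 r1 * s1)).1 * _ ≤ _ ∨ _
        exact ih _ (pvEuclid_step_lt r0 r1 h2) r1 _ s1 _ rfl

-- the validation tails agree, given the loop-exit fact
theorem pvTail_eq (A M r s : Int) (hM : M ≠ 0)
    (hexit : r * r ≤ PySem.Int.floordiv M 2 ∨ r = 0) :
    (if r = 0 then (none : Option (Int × Int)) else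
      if (if s < 0 then (-r, -s) else (r, s)).2 = 0 then none else
      if (if s < 0 then (-r, -s) else (r, s)).2 > ((Nat.sqrt (PySem.Int.floordiv M 2).toNat : Int)) then none else
      if (if s < 0 then (-r, -s) else (r, s)).1 < -((Nat.sqrt (PySem.Int.floordiv M 2).toNat : Int)) ∨
         (if s < 0 then (-r, -s) else (r, s)).1 > ((Nat.sqrt (PySem.Int.floordiv M 2).toNat : Int)) then none else
      if (if PySem.Int.mod (A * (if s < 0 then (-r, -s) else (r, s)).2 - (if s < 0 then (-r, -s) else (r, s)).1) M < 0
            then PySem.Int.mod (A * (if s < 0 then (-r, -s) else (r, s)).2 - (if s < 0 then (-r, -s) else (r, s)).1) M + M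
            else PySem.Int.mod (A * (if s < 0 then (-r, -s) else (r, s)).2 - (if s < 0 then (-r, -s) else (r, s)).1) M) ≠ 0 then none else
      if ((Int.gcd (if s < 0 then (-r, -s) else (r, s)).1 (if s < 0 then (-r, -s) else (r, s)).2 : Int)) ≠ 0 then
        some (PySem.Int.floordiv (if s < 0 then (-r, -s) else (r, s)).1 ((Int.gcd (if s < 0 then (-r, -s) else (r, s)).1 (if s < 0 then (-r, -s) else (r, s)).2 : Int)),
              PySem.Int.floordiv (if s < 0 then (-r, -s) else (r, s)).2 ((Int.gcd (if s < 0 then (-r, -s) else (r, s)).1 (if s < 0 then (-r, -s) else (r, s)).2 : Int)))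
      else some ((if s < 0 then (-r, -s) else (r, s)).1, (if s < 0 then (-r, -s) else (r, s)).2))
    =
    (if r = 0 then none else
      if (if s ≥ 0 then (r, s) else (-r, -s)).2 = 0 then none else
      if (if s ≥ 0 then (r, s) else (-r, -s)).2 > ((Nat.sqrt (PySem.Int.floordiv M 2).toNat : Int)) ∨
         (if s ≥ 0 then (r, s) else (-r, -s)).1 < -((Nat.sqrt (PySem.Int.floordiv M 2).toNat : Int)) ∨
         (if s ≥ 0 then (r, s) else (-r, -s)).1 > ((Nat.sqrt (PySem.Int.floordiv M 2).toNat : Int)) then none else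
      if PySem.Int.mod (A * (if s ≥ 0 then (r, s) else (-r, -s)).2 - (if s ≥ 0 then (r, s) else (-r, -s)).1) M ≠ 0 then none else
      some (PySem.Int.floordiv (if s ≥ 0 then (r, s) else (-r, -s)).1 ((Int.gcd (if s ≥ 0 then (r, s) else (-r, -s)).1 (if s ≥ 0 then (r, s) else (-r, -s)).2 : Int)),
            PySem.Int.floordiv (if s ≥ 0 then (r, s) else (-r, -s)).2 ((Int.gcd (if s ≥ 0 then (r, s) else (-r, -s)).1 (if s ≥ 0 then (r, s) else (-r, -s)).2 : Int)))) := by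
  by_cases hr : r = 0
  · simp [hr]
  rw [if_neg hr, if_neg hr]
  -- the two sign normalisations coincide
  have hsame : (if s < 0 then (-r, -s) else (r, s)) = (if s ≥ 0 then (r, s) else (-r, -s)) := by
    by_cases hs : s < 0
    · rw [if_pos hs, if_neg (by omega)]
    · rw [if_neg hs, if_pos (by omega)]
  rw [hsame]
  rcases (if s ≥ 0 then (r, s) else (-r, -s)) with ⟨p, d⟩
  dsimp only
  by_cases hd : d = 0
  · simp [hd]
  rw [if_neg hd, if_neg hd]
  -- M > 0 here: otherwise halfM < 0 and the loop could only exit with r = 0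
  have hMpos : 0 < M := by
    rcases hexit with hx | hx
    · by_contra hle
      have hneg : M < 0 := by omega
      have hdm := PySem.Int.floordiv_mul_add_mod M 2
      have h0 := PySem.Int.mod_nonneg M (by omega : (0:Int) < 2)
      have h2 := PySem.Int.mod_lt M (by omega : (0:Int) < 2)
      nlinarith [mul_self_nonneg r]
    · exact absurd hx hr
  have hnn := PySem.Int.mod_nonneg (A * d - p) hMpos
  rw [if_neg (by omega : ¬ PySem.Int.mod (A * d - p) M < 0)]
  generalize ((Nat.sqrt (PySem.Int.floordiv M 2).toNat : Int)) = b
  by_cases hb : d > b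
  · rw [if_pos hb, if_pos (Or.inl hb : d > b ∨ p < -b ∨ p > b)]
  rw [if_neg hb]
  by_cases hp : p < -b ∨ p > b
  · rw [if_pos hp, if_pos (Or.inr hp : d > b ∨ p < -b ∨ p > b)]
  rw [if_neg hp, if_neg (show ¬(d > b ∨ p < -b ∨ p > b) by tauto)]
  by_cases hl : PySem.Int.mod (A * d - p) M ≠ 0
  · rw [if_pos hl, if_pos hl]
  rw [if_neg hl, if_neg hl]
  have hg : ((Int.gcd p d : Int)) ≠ 0 := by
    simp only [ne_eq, Int.natCast_eq_zero, Int.gcd_eq_zero_iff, not_and]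
    intro _; exact hd
  rw [if_pos hg]

-- the two ports agree everywhere
theorem pvMain_eq (A M : Int) : rational_reconstruct A M = rational_reconstruct_alt A M := by
  by_cases hM : M = 0
  · simp [rational_reconstruct, rational_reconstruct_alt, hM]
  by_cases ha : PySem.Int.mod A M = 0
  · simp [rational_reconstruct, rational_reconstruct_alt, hM, ha]
  have hexit := pvLoopA_exit (PySem.Int.floordiv M 2) M
      (if PySem.Int.mod A M < 0 then PySem.Int.mod A M + M else PySem.Int.mod A M) 0 1
  rw [pvLoop_agree] at hexit
  simp only [rational_reconstruct, rational_reconstruct_alt, pvRebuild, if_neg hM, if_neg ha]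
  rw [pvLoop_agree]
  exact pvTail_eq A M _ _ hM hexit

-- ===== VERDICT (by name: the statement is the Claim_ definition above) =====
theorem rational_reconstruct_spec : Claim_equal_rational_reconstruct := by
  intro A M _
  exact pvMain_eq A M
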